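-- pv_equiv track=rewrite | github.com/bradschwyzer/itp-w1-create-box | create_box/main.py | create_box1
-- ===== SOURCE A (Python) =====
-- def create_box1(height, width, character):
--     string = ''
--
--     for i in range(height):
--      if i == 0:
--         string = string + (character *(width)) + '\n'
--      elif i == (height-1):
--         string = string + (character *(width)) + '\n'
--      else:
--         string = string + (character + " " * (width-2) + character) + '\n'
--     return string
-- ===== SOURCE B (Python) =====
-- def create_box1(height, width, character):
--     if height <= 0:
--         return ''
--     border = character * width + '\n'
--     if height == 1:
--         return border
--     middle = character + " " * (width - 2) + character + '\n'
--     return border + middle * (height - 2) + border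
-- ===== Notes on version B (the rewrite author's own statement) =====
-- stated objective: simpler
-- what changed: Replaces the row-by-row loop with per-index branches by a closed-form assembly: precompute the border and middle rows once and return border + middle*(height-2) + border.
import Mathlib
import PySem

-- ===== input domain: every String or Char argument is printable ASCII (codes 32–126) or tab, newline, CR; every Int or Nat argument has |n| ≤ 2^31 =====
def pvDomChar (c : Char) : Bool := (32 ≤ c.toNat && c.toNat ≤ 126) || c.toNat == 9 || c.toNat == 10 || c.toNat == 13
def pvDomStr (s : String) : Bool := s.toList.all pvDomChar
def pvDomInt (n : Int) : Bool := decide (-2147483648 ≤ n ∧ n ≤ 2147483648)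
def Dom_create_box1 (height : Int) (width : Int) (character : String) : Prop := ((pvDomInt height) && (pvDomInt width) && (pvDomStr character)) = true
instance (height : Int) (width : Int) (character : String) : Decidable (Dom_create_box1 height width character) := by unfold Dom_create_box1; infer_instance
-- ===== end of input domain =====

-- B replaces A's row-by-row loop with a closed-form assembly border ++ middle*(height-2) ++ border (objective: simpler).

-- ===== PORT A =====
-- A's loop: for i in range(height), appending one row per iteration with per-index branches.
def create_box1 (height : Int) (width : Int) (character : String) : String :=
  String.ofList <|
    (PySem.List.pyRange 0 height 1).foldl
      (fun s i =>
        if i = 0 then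
          s ++ (PySem.List.pyRepeat character.toList width) ++ ['\n']
        else if i = height - 1 then
          s ++ (PySem.List.pyRepeat character.toList width) ++ ['\n']
        else
          s ++ (character.toList ++ PySem.List.pyRepeat [' '] (width - 2) ++ character.toList) ++ ['\n'])
      []

-- ===== PORT B =====
-- B: precompute border and middle rows; return border ++ middle*(height-2) ++ border.
def create_box1_alt (height : Int) (width : Int) (character : String) : String :=
  if height ≤ 0 then ""
  else
    let border := PySem.List.pyRepeat character.toList width ++ ['\n']
    if height = 1 then String.ofList border
    else
      let middle := character.toList ++ PySem.List.pyRepeat [' '] (width - 2) ++ character.toList ++ ['\n']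
      String.ofList (border ++ PySem.List.pyRepeat middle (height - 2) ++ border)

-- ===== PRECONDITION & SPEC =====
def Spec_create_box1 (height : Int) (width : Int) (character : String) (out : String) : Prop := out = create_box1_alt height width character
instance (height : Int) (width : Int) (character : String) (out : String) : Decidable (Spec_create_box1 height width character out) := by unfold Spec_create_box1; infer_instance

-- ===== CLAIM (what is proved, stated in full; the proofs are below) =====
def Claim_equal_create_box1 : Prop := ∀ (height : Int) (width : Int) (character : String), Dom_create_box1 height width character → Spec_create_box1 height width character (create_box1 height width character)

-- ===== LEMMAS AND PROOFS =====

theorem pvRepeat_succ {α : Type} (xs : List α) (n : Int) (h : 0 ≤ n) :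
    PySem.List.pyRepeat xs (n + 1) = PySem.List.pyRepeat xs n ++ xs := by
  unfold PySem.List.pyRepeat
  have : (n + 1).toNat = n.toNat + 1 := by omega
  rw [this, List.replicate_succ']
  simp

-- the loop body of A's port
def pvStep (height width : Int) (character : String) (s : List Char) (i : Int) : List Char :=
  if i = 0 then
    s ++ (PySem.List.pyRepeat character.toList width) ++ ['\n']
  else if i = height - 1 then
    s ++ (PySem.List.pyRepeat character.toList width) ++ ['\n']
  else
    s ++ (character.toList ++ PySem.List.pyRepeat [' '] (width - 2) ++ character.toList) ++ ['\n']

-- invariant: after processing rows 0..k-1 (k ≤ height-1) the accumulator is border ++ middle*(k-1)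
theorem pvLoop_inv (height width : Int) (character : String) (k : Int)
    (h1 : 1 ≤ k) (h2 : k ≤ height - 1) :
    (PySem.List.pyRange 0 k 1).foldl (pvStep height width character) []
      = (PySem.List.pyRepeat character.toList width ++ ['\n'])
        ++ PySem.List.pyRepeat
            (character.toList ++ PySem.List.pyRepeat [' '] (width - 2) ++ character.toList ++ ['\n'])
            (k - 1) := by
  induction k, h1 using Int.le_induction with
  | base =>
      have h01 : PySem.List.pyRange 0 1 1 = [0] := by decide
      rw [h01]
      simp [pvStep, PySem.List.pyRepeat]
  | succ k hk ih =>
      rw [PySem.List.pyRange_one_succ_right (by omega), List.foldl_append,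
        ih (by omega), show k + 1 - 1 = (k - 1) + 1 by ring,
        pvRepeat_succ _ _ (by omega)]
      simp only [List.foldl_cons, List.foldl_nil, pvStep]
      rw [if_neg (by omega), if_neg (by omega)]
      simp

theorem create_box1_eq_alt (height width : Int) (character : String) :
    create_box1 height width character = create_box1_alt height width character := by
  unfold create_box1 create_box1_alt
  by_cases h0 : height ≤ 0
  · rw [if_pos h0, PySem.List.pyRange_one_eq_nil (by omega)]
    rfl
  · rw [if_neg h0]
    by_cases h1 : height = 1
    · subst h1
      rw [if_pos rfl,
        show (PySem.List.pyRange 0 1 1) = [0] from PySem.List.pyRange_one_singleton 0]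
      simp
    · have hr : PySem.List.pyRange 0 height 1
          = PySem.List.pyRange 0 (height - 1) 1 ++ [height - 1] := by
        conv_lhs => rw [show height = (height - 1) + 1 by ring]
        exact PySem.List.pyRange_one_succ_right (by omega)
      rw [if_neg h1, hr, List.foldl_append]
      have := pvLoop_inv height width character (height - 1) (by omega) (by omega)
      rw [show (fun s i => if i = 0 then
            s ++ (PySem.List.pyRepeat character.toList width) ++ ['\n']
          else if i = height - 1 then
            s ++ (PySem.List.pyRepeat character.toList width) ++ ['\n']
          else
            s ++ (character.toList ++ PySem.List.pyRepeat [' '] (width - 2) ++ character.toList) ++ ['\n'])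
          = pvStep height width character from rfl, this]
      simp only [List.foldl_cons, List.foldl_nil, pvStep]
      rw [if_neg (by omega)]
      simp [show height - 1 - 1 = height - 2 by ring]

-- ===== VERDICT (by name: the statement is the Claim_ definition above) =====
theorem create_box1_spec : Claim_equal_create_box1 := by
  intro height width character _
  exact create_box1_eq_alt height width character
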